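-- pv_equiv track=rewrite | github.com/mortyc126-debug/SHA | fm_real_collisions.py | compute_carry_bits
-- ===== SOURCE A (Python) =====
-- def compute_carry_bits(a, b):
--     """Compute carry bit at each position for a + b."""
--     carries = 0
--     c = 0
--     for k in range(32):
--         ak = (a >> k) & 1
--         bk = (b >> k) & 1
--         c = (ak & bk) | (ak & c) | (bk & c)
--         carries |= (c << k)
--     return carries
-- ===== SOURCE B (Python) =====
-- def compute_carry_bits(a, b):
--     """Compute carry bit at each position for a + b."""
--     a32 = a & 0xFFFFFFFF
--     b32 = b & 0xFFFFFFFF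
--     s = (a32 + b32) ^ a32 ^ b32
--     return (s >> 1) & 0xFFFFFFFF
-- ===== Notes on version B (the rewrite author's own statement) =====
-- stated objective: faster
-- what changed: Replaces the 32-iteration per-bit majority loop with the closed-form carry identity: mask both operands to 32 bits, compute s = (a32+b32) ^ a32 ^ b32 (the carry-in vector), and return (s >> 1) & 0xFFFFFFFF.
import Mathlib
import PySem

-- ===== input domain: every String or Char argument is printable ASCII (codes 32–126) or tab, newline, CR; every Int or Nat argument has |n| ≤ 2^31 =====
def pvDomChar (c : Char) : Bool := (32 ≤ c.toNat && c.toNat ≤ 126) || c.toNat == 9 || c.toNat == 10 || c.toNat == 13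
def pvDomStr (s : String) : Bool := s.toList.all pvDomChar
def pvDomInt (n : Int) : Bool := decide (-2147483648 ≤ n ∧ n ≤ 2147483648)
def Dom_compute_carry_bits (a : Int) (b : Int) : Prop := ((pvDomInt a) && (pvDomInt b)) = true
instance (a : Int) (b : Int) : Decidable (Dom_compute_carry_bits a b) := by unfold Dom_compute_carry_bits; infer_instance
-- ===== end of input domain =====

-- B replaces A's 32-iteration per-bit majority loop by the closed-form carry identity
-- (a32+b32) ^ a32 ^ b32 shifted right by one; equivalence is proved for all Int inputs.

-- ===== PORT A =====
-- body of Python A's `for k in range(32)` loop, state = (carries, c)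
def cbStep (a : Int) (b : Int) (st : Int × Int) (k : Nat) : Int × Int :=
  let ak := PySem.Int.band (a >>> k) 1
  let bk := PySem.Int.band (b >>> k) 1
  let c := PySem.Int.bor (PySem.Int.bor (PySem.Int.band ak bk) (PySem.Int.band ak st.2)) (PySem.Int.band bk st.2)
  (PySem.Int.bor st.1 (c <<< k), c)

def compute_carry_bits (a : Int) (b : Int) : Int :=
  ((List.range 32).foldl (cbStep a b) (0, 0)).1

-- ===== PORT B =====
def compute_carry_bits_alt (a : Int) (b : Int) : Int :=
  let a32 := PySem.Int.band a 4294967295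
  let b32 := PySem.Int.band b 4294967295
  let s := PySem.Int.bxor (PySem.Int.bxor (a32 + b32) a32) b32
  PySem.Int.band (s >>> 1) 4294967295

-- ===== PRECONDITION & SPEC =====
def Spec_compute_carry_bits (a : Int) (b : Int) (out : Int) : Prop := out = compute_carry_bits_alt a b
instance (a : Int) (b : Int) (out : Int) : Decidable (Spec_compute_carry_bits a b out) := by unfold Spec_compute_carry_bits; infer_instance

-- ===== CLAIM (what is proved, stated in full; the proofs are below) =====
def Claim_equal_compute_carry_bits : Prop := ∀ (a : Int) (b : Int), Dom_compute_carry_bits a b → Spec_compute_carry_bits a b (compute_carry_bits a b)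

-- ===== LEMMAS AND PROOFS =====

-- the low 32 bits of a, as a natural number
def cbNat (a : Int) : Nat := (a % 4294967296).toNat

-- carry INTO bit position k when adding A and B
def cbCin (A B k : Nat) : Nat := (A % 2 ^ k + B % 2 ^ k) / 2 ^ k

-- the xor carry vector of B's algorithm
def cbS (A B : Nat) : Nat := ((A + B) ^^^ A) ^^^ B

-- value of A's `carries` accumulator after n iterations
def cbCar (A B n : Nat) : Nat := (cbS A B / 2) % 2 ^ n

theorem cb_band_mask (a : Int) : PySem.Int.band a 4294967295 = ((cbNat a : Nat) : Int) := by
  unfold PySem.Int.band cbNat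
  split_ifs with h1 h2 h2 <;> try omega
  · rw [show ((4294967295 : Int)).toNat = 2 ^ 32 - 1 by rfl, Nat.and_two_pow_sub_one_eq_mod]
    omega
  · rw [show ((4294967295 : Int)).toNat = 2 ^ 32 - 1 by rfl, Nat.and_comm,
      Nat.and_two_pow_sub_one_eq_mod]
    omega

theorem cb_bit_read (a : Int) (k : Nat) (hk : k < 32) :
    PySem.Int.band (a >>> k) 1 = ((cbNat a / 2 ^ k % 2 : Nat) : Int) := by
  rw [PySem.Int.band_one, PySem.Int.mod_eq_emod_of_pos (by norm_num), Int.shiftRight_eq_div_pow]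
  have hA : (cbNat a : Int) = a % 4294967296 := by unfold cbNat; omega
  have h2 : (0 : Int) < 2 ^ k := by positivity
  have ha : a = (cbNat a : Int) + 2 ^ k * (2 ^ (31 - k) * (2 * (a / 4294967296))) := by
    have h32 : (2 : Int) ^ k * (2 ^ (31 - k) * (2 * (a / 4294967296)))
        = 4294967296 * (a / 4294967296) := by
      rw [show (2 : Int) ^ k * (2 ^ (31 - k) * (2 * (a / 4294967296)))
          = 2 ^ k * 2 ^ (31 - k) * 2 * (a / 4294967296) by ring, ← pow_add,
        show k + (31 - k) = 31 by omega]
      norm_num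
    rw [hA, h32]
    omega
  rw [show ((2 ^ k : Nat) : Int) = (2 : Int) ^ k by push_cast; rfl]
  rw [show a / (2 : Int) ^ k % 2
      = ((cbNat a : Int) + 2 ^ k * (2 ^ (31 - k) * (2 * (a / 4294967296)))) / 2 ^ k % 2 by
    rw [← ha]]
  rw [Int.add_mul_ediv_left _ _ h2.ne']
  rw [show (cbNat a : Int) / 2 ^ k + 2 ^ (31 - k) * (2 * (a / 4294967296))
      = (cbNat a : Int) / 2 ^ k + 2 * (2 ^ (31 - k) * (a / 4294967296)) by ring]
  rw [Int.add_mul_emod_self_left]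
  rw [show ((cbNat a / 2 ^ k % 2 : Nat) : Int)
      = (cbNat a : Int) / ((2 ^ k : Nat) : Int) % ((2 : Nat) : Int) by push_cast; rfl]
  push_cast
  rfl

theorem cb_div_two_cases (p x : Nat) (_hp : 0 < p) (hx : x < 2 * p) :
    x / p = if p ≤ x then 1 else 0 := by
  split_ifs with h
  · exact Nat.div_eq_of_lt_le (by omega) (by omega)
  · exact Nat.div_eq_of_lt (by omega)

theorem cb_cin_le_one (A B k : Nat) : cbCin A B k ≤ 1 := by
  unfold cbCin
  have h1 := Nat.mod_lt A (Nat.two_pow_pos k)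
  have h2 := Nat.mod_lt B (Nat.two_pow_pos k)
  rw [cb_div_two_cases _ _ (Nat.two_pow_pos k) (by omega)]
  split_ifs <;> omega

theorem cb_maj_step (A B k : Nat) :
    PySem.Int.bor
      (PySem.Int.bor (PySem.Int.band ((A / 2 ^ k % 2 : Nat) : Int) ((B / 2 ^ k % 2 : Nat) : Int))
        (PySem.Int.band ((A / 2 ^ k % 2 : Nat) : Int) ((cbCin A B k : Nat) : Int)))
      (PySem.Int.band ((B / 2 ^ k % 2 : Nat) : Int) ((cbCin A B k : Nat) : Int))
    = ((cbCin A B (k + 1) : Nat) : Int) := by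
  have hp := Nat.two_pow_pos k
  have hxA := Nat.mod_lt A hp
  have hxB := Nat.mod_lt B hp
  have hA : A % 2 ^ (k + 1) = A % 2 ^ k + 2 ^ k * (A / 2 ^ k % 2) := by
    rw [pow_succ, Nat.mod_mul]
  have hB : B % 2 ^ (k + 1) = B % 2 ^ k + 2 ^ k * (B / 2 ^ k % 2) := by
    rw [pow_succ, Nat.mod_mul]
  have hc : cbCin A B k = if 2 ^ k ≤ A % 2 ^ k + B % 2 ^ k then 1 else 0 :=
    cb_div_two_cases _ _ hp (by omega)
  have hc1 : cbCin A B (k + 1) = if 2 ^ (k + 1) ≤ A % 2 ^ (k + 1) + B % 2 ^ (k + 1) then 1 else 0 := by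
    have hxA1 := Nat.mod_lt A (Nat.two_pow_pos (k + 1))
    have hxB1 := Nat.mod_lt B (Nat.two_pow_pos (k + 1))
    exact cb_div_two_cases _ _ (Nat.two_pow_pos (k + 1)) (by omega)
  rw [pow_succ] at hA hB hc1
  rcases Nat.mod_two_eq_zero_or_one (A / 2 ^ k) with h1 | h1 <;>
    rcases Nat.mod_two_eq_zero_or_one (B / 2 ^ k) with h2 | h2 <;>
    rw [h1] at hA ⊢ <;> rw [h2] at hB ⊢ <;> rw [hc1, hc] <;> split_ifs <;>
    first
      | (push_cast; decide)
      | (exfalso; omega)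

theorem cb_parity (qa qb c : Nat) (hc : c ≤ 1) :
    (((decide ((qa + qb + c) % 2 = 1)).xor (decide (qa % 2 = 1))).xor (decide (qb % 2 = 1)))
      = decide (c = 1) := by
  rcases Nat.mod_two_eq_zero_or_one qa with h1 | h1 <;>
    rcases Nat.mod_two_eq_zero_or_one qb with h2 | h2 <;>
    interval_cases c <;>
    simp [Nat.add_mod, h1, h2]

theorem cb_sbit (A B j : Nat) : cbS A B / 2 ^ j % 2 = cbCin A B j := by
  have hp := Nat.two_pow_pos j
  have hdiv : (A + B) / 2 ^ j = A / 2 ^ j + B / 2 ^ j + cbCin A B j := by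
    unfold cbCin
    have h : A + B = A % 2 ^ j + B % 2 ^ j + 2 ^ j * (A / 2 ^ j + B / 2 ^ j) := by
      rw [Nat.mul_add]
      linarith [Nat.div_add_mod A (2 ^ j), Nat.div_add_mod B (2 ^ j)]
    rw [h, Nat.add_mul_div_left _ _ hp]
    ring
  have htb : (cbS A B).testBit j = decide (cbCin A B j = 1) := by
    unfold cbS
    rw [Nat.testBit_xor, Nat.testBit_xor]
    rw [Nat.testBit_eq_decide_div_mod_eq, Nat.testBit_eq_decide_div_mod_eq,
      Nat.testBit_eq_decide_div_mod_eq, hdiv]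
    exact cb_parity _ _ _ (cb_cin_le_one A B j)
  rw [Nat.testBit_eq_decide_div_mod_eq] at htb
  have hle := cb_cin_le_one A B j
  rcases Nat.mod_two_eq_zero_or_one (cbS A B / 2 ^ j) with h | h
  · rw [h] at htb ⊢
    simp at htb
    generalize hg : cbCin A B j = c at htb hle ⊢
    omega
  · rw [h] at htb ⊢
    simp at htb
    generalize hg : cbCin A B j = c at htb hle ⊢
    omega

theorem cb_loop_inv (a b : Int) (n : Nat) (hn : n ≤ 32) :
    (List.range n).foldl (cbStep a b) (0, 0)
      = (((cbCar (cbNat a) (cbNat b) n : Nat) : Int), ((cbCin (cbNat a) (cbNat b) n : Nat) : Int)) := by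
  induction n with
  | zero => simp [cbCar, cbCin]
  | succ n ih =>
    rw [List.range_succ, List.foldl_append, ih (by omega), List.foldl_cons, List.foldl_nil]
    unfold cbStep
    rw [cb_bit_read a n (by omega), cb_bit_read b n (by omega)]
    simp only [cb_maj_step]
    have hsh : (((cbCin (cbNat a) (cbNat b) (n + 1) : Nat) : Int)) <<< n
        = ((cbCin (cbNat a) (cbNat b) (n + 1) <<< n : Nat) : Int) := by
      simp
    rw [hsh, PySem.Int.bor_natCast]
    have hcar : cbCar (cbNat a) (cbNat b) n ||| cbCin (cbNat a) (cbNat b) (n + 1) <<< n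
        = cbCar (cbNat a) (cbNat b) (n + 1) := by
      have hlt : cbCar (cbNat a) (cbNat b) n < 2 ^ n := Nat.mod_lt _ (Nat.two_pow_pos n)
      rw [Nat.shiftLeft_eq, Nat.mul_comm, Nat.lor_comm, ← Nat.two_pow_add_eq_or_of_lt hlt]
      unfold cbCar
      rw [pow_succ, Nat.mod_mul, Nat.div_div_eq_div_mul, ← pow_succ', cb_sbit]
      ring
    rw [hcar]

theorem cb_alt_closed (a b : Int) :
    compute_carry_bits_alt a b = ((cbCar (cbNat a) (cbNat b) 32 : Nat) : Int) := by
  unfold compute_carry_bits_alt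
  dsimp only
  rw [cb_band_mask a, cb_band_mask b]
  rw [show ((cbNat a : Int) + (cbNat b : Int)) = ((cbNat a + cbNat b : Nat) : Int) by push_cast; ring]
  rw [PySem.Int.bxor_natCast, PySem.Int.bxor_natCast]
  rw [show (((((cbNat a + cbNat b) ^^^ cbNat a) ^^^ cbNat b : Nat) : Int)) >>> 1
      = (((((cbNat a + cbNat b) ^^^ cbNat a) ^^^ cbNat b) >>> 1 : Nat) : Int) by
    rw [show (1 : Int) = ((1 : Nat) : Int) by rfl, Int.shiftRight_natCast]]
  rw [show (4294967295 : Int) = ((4294967295 : Nat) : Int) by rfl, PySem.Int.band_natCast]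
  unfold cbCar cbS
  congr 1
  rw [show (4294967295 : Nat) = 2 ^ 32 - 1 by rfl, Nat.and_two_pow_sub_one_eq_mod,
    Nat.shiftRight_eq_div_pow]

-- ===== VERDICT (by name: the statement is the Claim_ definition above) =====
theorem compute_carry_bits_spec : Claim_equal_compute_carry_bits := by
  intro a b _
  unfold Spec_compute_carry_bits compute_carry_bits
  rw [cb_loop_inv a b 32 (by omega), cb_alt_closed]
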